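-- pv_equiv track=rewrite | github.com/JonathanBechtel/draft-app | alembic/versions/0cdc5f018a72_create_positions_table.py | derive_position_tags
-- ===== SOURCE A (Python) =====
-- from typing import List, Optional, Dict
--
-- _BASE_ORDER = ["PG", "SG", "SF", "PF", "C", "G", "F"]
--
-- _BASE_NORMALIZATION = {
--     "PG": "PG",
--     "POINT": "PG",
--     "POINTGUARD": "PG",
--     "SG": "SG",
--     "SHOOTING": "SG",
--     "SHOOTINGGUARD": "SG",
--     "SF": "SF",
--     "SMALL": "SF",
--     "SMALLFORWARD": "SF",
--     "PF": "PF",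
--     "POWER": "PF",
--     "POWERFORWARD": "PF",
--     "C": "C",
--     "CENTER": "C",
--     "G": "G",
--     "F": "F",
-- }
--
-- def _tokenize_raw_position(raw: str) -> List[str]:
--     cleaned = raw.replace("/", "-").replace(" ", "").upper()
--     tokens = [tok for tok in cleaned.split("-") if tok]
--     normalized: List[str] = []
--     for token in tokens:
--         canonical = _BASE_NORMALIZATION.get(token)
--         if canonical is None:
--             continue
--         normalized.append(canonical)
--     if not normalized:
--         return []
--     unique: List[str] = []
--     for token in normalized:
--         if token not in unique:
--             unique.append(token)
--     order_index = {code: idx for idx, code in enumerate(_BASE_ORDER)}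
--     unique.sort(key=lambda code: order_index.get(code, len(_BASE_ORDER)))
--     return unique
--
-- def derive_position_tags(raw: Optional[str]) -> Optional[str]:
--     if raw is None:
--         return None
--     raw = raw.strip()
--     if not raw:
--         return None
--     tokens = _tokenize_raw_position(raw)
--     if not tokens:
--         return None
--     fine_token = "_".join(token.lower() for token in tokens)
--     return fine_token
-- ===== SOURCE B (Python) =====
-- _POSITION_ALIASES = [
--     ("PG", ("PG", "POINT", "POINTGUARD")),
--     ("SG", ("SG", "SHOOTING", "SHOOTINGGUARD")),
--     ("SF", ("SF", "SMALL", "SMALLFORWARD")),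
--     ("PF", ("PF", "POWER", "POWERFORWARD")),
--     ("C", ("C", "CENTER")),
--     ("G", ("G",)),
--     ("F", ("F",)),
-- ]
--
--
-- def derive_position_tags(raw):
--     if raw is None:
--         return None
--     raw = raw.strip()
--     if not raw:
--         return None
--     tokens = set(raw.replace("/", "-").replace(" ", "").upper().split("-"))
--     tags = [code.lower() for code, aliases in _POSITION_ALIASES
--             if any(a in tokens for a in aliases)]
--     return "_".join(tags) if tags else None
-- ===== Notes on version B (the rewrite author's own statement) =====
-- stated objective: simpler
-- what changed: Inverts the mapping direction: instead of normalizing each token via the alias->canonical dict, then deduplicating with a loop and sorting by a built index map, B builds a token set once and makes a single pass over an inverted canonical->aliases table, emitting each canonical code whose alias set intersects the tokens; order and dedup come for free from the table.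
import Mathlib
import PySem

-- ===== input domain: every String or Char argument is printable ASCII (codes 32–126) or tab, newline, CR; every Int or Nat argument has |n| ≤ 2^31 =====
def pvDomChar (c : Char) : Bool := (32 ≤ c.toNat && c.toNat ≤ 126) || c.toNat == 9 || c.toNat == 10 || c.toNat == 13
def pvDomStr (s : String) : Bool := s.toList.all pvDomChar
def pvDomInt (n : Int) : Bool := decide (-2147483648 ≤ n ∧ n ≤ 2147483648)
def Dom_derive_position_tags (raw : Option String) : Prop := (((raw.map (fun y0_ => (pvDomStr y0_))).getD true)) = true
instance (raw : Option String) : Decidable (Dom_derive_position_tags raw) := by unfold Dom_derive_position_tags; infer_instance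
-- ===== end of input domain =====

-- B inverts the mapping: one pass over a canonical->aliases table against a token set, replacing A's per-token dict mapping + dedup loop + index-keyed sort (simpler; same result).


-- ===== PORT A =====
def pvBaseOrder : List String := ["PG", "SG", "SF", "PF", "C", "G", "F"]

def pvBaseNorm : PySem.Dict String String := PySem.Dict.ofList
  [("PG","PG"),("POINT","PG"),("POINTGUARD","PG"),
   ("SG","SG"),("SHOOTING","SG"),("SHOOTINGGUARD","SG"),
   ("SF","SF"),("SMALL","SF"),("SMALLFORWARD","SF"),
   ("PF","PF"),("POWER","PF"),("POWERFORWARD","PF"),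
   ("C","C"),("CENTER","C"),("G","G"),("F","F")]

def pvTokenizeRawPosition (raw : String) : List String :=
  let cleaned := PySem.Str.upper (PySem.Str.replace (PySem.Str.replace raw "/" "-") " " "")
  let tokens := ((PySem.Str.split? cleaned "-").getD []).filter (fun t => t ≠ "")
  let normalized := tokens.foldl (fun acc token =>
    match pvBaseNorm.get? token with
    | none => acc
    | some c => acc ++ [c]) []
  if normalized = [] then []
  else
    let unique := normalized.foldl (fun u t => if t ∈ u then u else u ++ [t]) []
    let orderIndex : PySem.Dict String Int :=
      (PySem.List.enumerate pvBaseOrder).foldl (fun d p => d.insert p.2 p.1) PySem.Dict.empty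
    PySem.List.sorted unique (fun code => orderIndex.getD code ((pvBaseOrder.length : Int))) false

def derive_position_tags (raw : Option String) : Option String :=
  match raw with
  | none => none
  | some s =>
    let r := PySem.Str.strip s
    if r = "" then none
    else
      let tokens := pvTokenizeRawPosition r
      if tokens = [] then none
      else some (PySem.Str.join "_" (tokens.map PySem.Str.lower))

-- ===== PORT B =====
def pvPositionAliases : List (String × List String) :=
  [("PG", ["PG", "POINT", "POINTGUARD"]),
   ("SG", ["SG", "SHOOTING", "SHOOTINGGUARD"]),
   ("SF", ["SF", "SMALL", "SMALLFORWARD"]),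
   ("PF", ["PF", "POWER", "POWERFORWARD"]),
   ("C", ["C", "CENTER"]),
   ("G", ["G"]),
   ("F", ["F"])]

def derive_position_tags_alt (raw : Option String) : Option String :=
  match raw with
  | none => none
  | some s =>
    let r := PySem.Str.strip s
    if r = "" then none
    else
      let tokens : PySem.Set String := PySem.Set.ofList
        ((PySem.Str.split? (PySem.Str.upper (PySem.Str.replace (PySem.Str.replace r "/" "-") " " "")) "-").getD [])
      let tags := (pvPositionAliases.filter
          (fun p => p.2.any (fun a => PySem.Set.contains tokens a))).map
          (fun p => PySem.Str.lower p.1)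
      if tags = [] then none else some (PySem.Str.join "_" tags)

-- ===== PRECONDITION & SPEC =====
def Spec_derive_position_tags (raw : Option String) (out : Option String) : Prop := out = derive_position_tags_alt raw
instance (raw : Option String) (out : Option String) : Decidable (Spec_derive_position_tags raw out) := by unfold Spec_derive_position_tags; infer_instance

-- ===== CLAIM (what is proved, stated in full; the proofs are below) =====
def Claim_equal_derive_position_tags : Prop := ∀ (raw : Option String), Dom_derive_position_tags raw → Spec_derive_position_tags raw (derive_position_tags raw)

-- ===== LEMMAS AND PROOFS =====

-- A's normalization fold appends the filterMapped canonicals.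
theorem pv_normFold (ts : List String) (acc : List String) :
    ts.foldl (fun acc token =>
      match pvBaseNorm.get? token with
      | none => acc
      | some c => acc ++ [c]) acc = acc ++ ts.filterMap pvBaseNorm.get? := by
  induction ts generalizing acc with
  | nil => simp
  | cons t ts ih =>
    cases h : pvBaseNorm.get? t <;> simp [List.foldl_cons, h, ih]

-- Empty tokens never normalize, so A's pre-filter does not change the filterMap.
theorem pv_filterMap_filter (ts : List String) :
    (ts.filter (fun t => t ≠ "")).filterMap pvBaseNorm.get? = ts.filterMap pvBaseNorm.get? := by
  induction ts with
  | nil => rfl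
  | cons t ts ih =>
    rw [List.filter_cons]
    by_cases h : t = ""
    · rw [if_neg (by simp [h]), ih, List.filterMap_cons, h]
      have h2 : pvBaseNorm.get? "" = none := by decide
      rw [h2]
    · rw [if_pos (by simp [h]), List.filterMap_cons, List.filterMap_cons, ih]

-- A's dedup loop is Set.ofList.
theorem pv_unique_eq_ofList (ns : List String) :
    ns.foldl (fun u t => if t ∈ u then u else u ++ [t]) [] = PySem.Set.ofList ns := by
  rw [PySem.Set.ofList_eq_foldl]
  apply PySem.List.foldl_congr_mem
  intro u t _
  by_cases h : t ∈ u
  · rw [if_pos h, PySem.Set.add, if_pos ((PySem.Set.contains_iff u t).mpr h)]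
  · rw [if_neg h, PySem.Set.add, if_neg (by simpa using (not_congr (PySem.Set.contains_iff u t)).mpr h)]

-- Every canonical value is in pvBaseOrder.
theorem pv_values_mem (t x : String) (h : pvBaseNorm.get? t = some x) : x ∈ pvBaseOrder := by
  have hx := PySem.Dict.mem_items_of_get?_eq_some pvBaseNorm h
  fin_cases hx <;> decide

-- get? of the literal dict is the same as membership of its items list.
theorem pv_get_items (t x : String) : pvBaseNorm.get? t = some x ↔ (t, x) ∈ pvBaseNorm.items := by
  constructor
  · exact PySem.Dict.mem_items_of_get?_eq_some pvBaseNorm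
  · intro h
    fin_cases h <;> decide

-- The alias table is exactly the fibers of the normalization dict.
theorem pv_alias_fiber (c : String) (as : List String) (h : (c, as) ∈ pvPositionAliases)
    (t : String) : pvBaseNorm.get? t = some c ↔ t ∈ as := by
  rw [pv_get_items]
  fin_cases h <;>
    simp [show pvBaseNorm.items = [("PG","PG"),("POINT","PG"),("POINTGUARD","PG"),
      ("SG","SG"),("SHOOTING","SG"),("SHOOTINGGUARD","SG"),
      ("SF","SF"),("SMALL","SF"),("SMALLFORWARD","SF"),
      ("PF","PF"),("POWER","PF"),("POWERFORWARD","PF"),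
      ("C","C"),("CENTER","C"),("G","G"),("F","F")] from by decide,
      Prod.ext_iff] <;>
    constructor <;> intro h' <;> rcases h' with h' | h' | h' | h' | h' | h' | h' | h' |
      h' | h' | h' | h' | h' | h' | h' | h' <;> simp_all

-- Pull a map-of-filter on pairs down to a filter on the firsts when the predicate only depends on them.
theorem pv_filter_pairs (l : List (String × List String))
    (p : String × List String → Bool) (q : String → Bool)
    (h : ∀ x ∈ l, p x = q x.1) :
    (l.filter p).map (fun x => PySem.Str.lower x.1)
      = ((l.map Prod.fst).filter q).map PySem.Str.lower := by
  induction l with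
  | nil => rfl
  | cons x l ih =>
    have hx := h x (List.mem_cons_self)
    have ih' := ih (fun y hy => h y (List.mem_cons_of_mem _ hy))
    by_cases hp : p x = true
    · rw [List.filter_cons, if_pos hp, List.map_cons, List.map_cons, List.filter_cons,
        if_pos (hx ▸ hp), List.map_cons, ih']
    · rw [List.filter_cons, if_neg hp, List.map_cons, List.filter_cons,
        if_neg (by rw [← hx]; exact hp), ih']

-- B's alias-selection pass equals A's sort-free characterization: selection over pvBaseOrder.
theorem pv_alias_eq_order_filter (ts : List String) :
    (pvPositionAliases.filter
        (fun p => p.2.any (fun a => PySem.Set.contains (PySem.Set.ofList ts) a))).map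
        (fun p => PySem.Str.lower p.1)
      = (pvBaseOrder.filter
          (fun c => PySem.Set.contains (PySem.Set.ofList (ts.filterMap pvBaseNorm.get?)) c)).map
          PySem.Str.lower := by
  have hfst : pvPositionAliases.map Prod.fst = pvBaseOrder := by decide
  rw [← hfst]
  apply pv_filter_pairs
  intro x hx
  rcases x with ⟨c, as⟩
  rw [Bool.eq_iff_iff]
  simp only [List.any_eq_true, PySem.Set.contains_iff, PySem.Set.mem_ofList,
    List.mem_filterMap]
  constructor
  · rintro ⟨a, ha, hat⟩
    exact ⟨a, hat, (pv_alias_fiber c as hx a).mpr ha⟩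
  · rintro ⟨t, hts, hget⟩
    exact ⟨t, (pv_alias_fiber c as hx t).mp hget, hts⟩

-- A's sorted dedup, mapped through lower, equals B's selection (both are the ordered sublist of pvBaseOrder).
theorem pv_sort_eq_filter (ns : List String) (hmem : ∀ x ∈ ns, x ∈ pvBaseOrder) :
    PySem.List.sorted (PySem.Set.ofList ns)
      (fun code => ((PySem.List.enumerate pvBaseOrder).foldl (fun d p => d.insert p.2 p.1)
        PySem.Dict.empty).getD code ((pvBaseOrder.length : Int))) false
      = pvBaseOrder.filter (fun c => PySem.Set.contains (PySem.Set.ofList ns) c) := by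
  apply PySem.List.sorted_eq_of_perm_of_pairwise_lt
  · rw [List.perm_ext_iff_of_nodup]
    · intro a
      simp only [List.mem_filter, PySem.Set.contains_iff, PySem.Set.mem_ofList]
      constructor
      · rintro ⟨_, hb⟩; exact hb
      · intro ha; exact ⟨hmem a ha, ha⟩
    · exact List.Nodup.filter _ (by decide)
    · exact PySem.Set.nodup_ofList ns
  · apply List.Pairwise.filter
    decide

-- The selection is nonempty when ns is.
theorem pv_filter_ne_nil (ns : List String) (hn : ns ≠ []) (hmem : ∀ x ∈ ns, x ∈ pvBaseOrder) :
    pvBaseOrder.filter (fun c => PySem.Set.contains (PySem.Set.ofList ns) c) ≠ [] := by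
  obtain ⟨x, hx⟩ := List.exists_mem_of_ne_nil ns hn
  apply List.ne_nil_of_mem (a := x)
  rw [List.mem_filter]
  exact ⟨hmem x hx, by simpa [PySem.Set.contains_iff, PySem.Set.mem_ofList] using hx⟩

-- ===== VERDICT (by name: the statement is the Claim_ definition above) =====
theorem derive_position_tags_spec : Claim_equal_derive_position_tags := by
  intro raw _
  unfold Spec_derive_position_tags
  match raw with
  | none => rfl
  | some s =>
    simp only [derive_position_tags, derive_position_tags_alt, pvTokenizeRawPosition]
    by_cases h0 : PySem.Str.strip s = ""
    · simp [h0]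
    · simp only [h0, if_false]
      generalize (PySem.Str.split? (PySem.Str.upper (PySem.Str.replace
        (PySem.Str.replace (PySem.Str.strip s) "/" "-") " " "")) "-").getD [] = ts
      rw [pv_normFold, List.nil_append, pv_filterMap_filter, pv_alias_eq_order_filter]
      have hmem : ∀ x ∈ ts.filterMap pvBaseNorm.get?, x ∈ pvBaseOrder := by
        intro x hx
        rcases List.mem_filterMap.mp hx with ⟨t, _, hget⟩
        exact pv_values_mem t x hget
      generalize hg : ts.filterMap pvBaseNorm.get? = ns at hmem ⊢
      by_cases hn : ns = []
      · simp [hn, PySem.Set.ofList]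
      · have hf := pv_filter_ne_nil ns hn hmem
        rw [if_neg hn, pv_unique_eq_ofList, pv_sort_eq_filter ns hmem,
          if_neg hf, if_neg (by simp only [List.map_eq_nil_iff]; exact hf)]
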